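-- pv_equiv track=rewrite | github.com/brooot/Data_Distribution_with_Encoding | bit_distribution+GC_forward+90%pull/choose_data.py | getDegreeSquque
-- ===== SOURCE A (Python) =====
-- def getDegreeSquque(nsource):
--     time_queue = []
--     for i in range(5000):
--         if i < 129 * nsource:
--             time_queue.append(1)
--         elif i >= 129 * nsource and i < 200 * nsource:
--             time_queue.append(2)
--         elif i >= 200 * nsource and i < 300 * nsource:
--             time_queue.append(3)
--         elif i >= 300 * nsource and i < 338 * nsource:
--             time_queue.append(4)
--         elif i >= 338 * nsource and i < 353 * nsource:
--             time_queue.append(5)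
--         elif i >= 353 * nsource and i < 362 * nsource:
--             time_queue.append(6)
--         else:
--             time_queue.append(7)
--     return time_queue
-- ===== SOURCE B (Python) =====
-- def _bisect_right(a, x):
--     lo, hi = 0, len(a)
--     while lo < hi:
--         mid = (lo + hi) // 2
--         if x < a[mid]:
--             hi = mid
--         else:
--             lo = mid + 1
--     return lo
--
-- def getDegreeSquque(nsource):
--     thresholds = [129 * nsource, 200 * nsource, 300 * nsource,
--                   338 * nsource, 353 * nsource, 362 * nsource]
--     return [_bisect_right(thresholds, i) + 1 for i in range(5000)]
-- ===== Notes on version B (the rewrite author's own statement) =====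
-- stated objective: idiomatic
-- what changed: Replaces the per-element six-way if/elif branch chain with a precomputed threshold table and a hand-written bisect_right binary search per index.
import Mathlib
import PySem

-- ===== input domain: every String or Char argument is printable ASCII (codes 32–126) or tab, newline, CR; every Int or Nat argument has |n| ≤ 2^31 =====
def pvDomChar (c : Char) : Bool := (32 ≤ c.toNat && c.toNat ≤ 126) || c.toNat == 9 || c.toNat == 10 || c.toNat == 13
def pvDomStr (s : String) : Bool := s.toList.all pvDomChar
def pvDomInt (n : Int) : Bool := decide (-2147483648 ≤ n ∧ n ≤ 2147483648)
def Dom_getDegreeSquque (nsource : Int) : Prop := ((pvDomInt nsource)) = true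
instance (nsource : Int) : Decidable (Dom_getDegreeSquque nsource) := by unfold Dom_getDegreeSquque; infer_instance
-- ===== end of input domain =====

-- B replaces the per-element if/elif chain by a precomputed threshold table and a
-- hand-written bisect_right binary search (objective: idiomatic/alternative, not faster).

-- ===== PORT A =====
def getDegreeSquque (nsource : Int) : List Int :=
  (PySem.List.pyRange 0 5000 1).foldl
    (fun time_queue i =>
      if i < 129 * nsource then time_queue ++ [1]
      else if i ≥ 129 * nsource ∧ i < 200 * nsource then time_queue ++ [2]
      else if i ≥ 200 * nsource ∧ i < 300 * nsource then time_queue ++ [3]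
      else if i ≥ 300 * nsource ∧ i < 338 * nsource then time_queue ++ [4]
      else if i ≥ 338 * nsource ∧ i < 353 * nsource then time_queue ++ [5]
      else if i ≥ 353 * nsource ∧ i < 362 * nsource then time_queue ++ [6]
      else time_queue ++ [7]) []

-- ===== PORT B =====
-- hand port of Source B's _bisect_right while-loop; fuel = hi - lo bound (list length);
-- indices are Nats, exact for Python here since lo, hi, mid are always nonnegative in range.
def bisectGo (a : List Int) (x : Int) : Nat → Nat → Nat → Nat
  | 0, lo, _ => lo
  | fuel + 1, lo, hi =>
    if lo < hi then
      let mid := (lo + hi) / 2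
      if x < a.getD mid 0 then bisectGo a x fuel lo mid
      else bisectGo a x fuel (mid + 1) hi
    else lo

def bisectRight (a : List Int) (x : Int) : Nat := bisectGo a x a.length 0 a.length

def getDegreeSquque_alt (nsource : Int) : List Int :=
  let thresholds : List Int :=
    [129 * nsource, 200 * nsource, 300 * nsource, 338 * nsource, 353 * nsource, 362 * nsource]
  (PySem.List.pyRange 0 5000 1).map (fun i => (bisectRight thresholds i : Int) + 1)

-- ===== PRECONDITION & SPEC =====
def Spec_getDegreeSquque (nsource : Int) (out : List Int) : Prop := out = getDegreeSquque_alt nsource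
instance (nsource : Int) (out : List Int) : Decidable (Spec_getDegreeSquque nsource out) := by unfold Spec_getDegreeSquque; infer_instance

-- ===== CLAIM (what is proved, stated in full; the proofs are below) =====
def Claim_equal_getDegreeSquque : Prop := ∀ (nsource : Int), Dom_getDegreeSquque nsource → Spec_getDegreeSquque nsource (getDegreeSquque nsource)

-- ===== LEMMAS AND PROOFS =====

theorem pointwise (n i : Int) (hi : 0 ≤ i) :
    (if i < 129 * n then (1 : Int)
     else if i ≥ 129 * n ∧ i < 200 * n then 2
     else if i ≥ 200 * n ∧ i < 300 * n then 3
     else if i ≥ 300 * n ∧ i < 338 * n then 4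
     else if i ≥ 338 * n ∧ i < 353 * n then 5
     else if i ≥ 353 * n ∧ i < 362 * n then 6
     else 7)
    = (bisectRight [129 * n, 200 * n, 300 * n, 338 * n, 353 * n, 362 * n] i : Int) + 1 := by
  simp only [bisectRight, List.length_cons, List.length_nil]
  norm_num [bisectGo]
  split_ifs <;> omega

set_option maxRecDepth 4000 in
theorem getDegreeSquque_spec : Claim_equal_getDegreeSquque := by
  intro n _
  unfold Spec_getDegreeSquque getDegreeSquque getDegreeSquque_alt
  have h : ∀ (time_queue : List Int) i, 0 ≤ i →
      (if i < 129 * n then time_queue ++ [1]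
       else if i ≥ 129 * n ∧ i < 200 * n then time_queue ++ [2]
       else if i ≥ 200 * n ∧ i < 300 * n then time_queue ++ [3]
       else if i ≥ 300 * n ∧ i < 338 * n then time_queue ++ [4]
       else if i ≥ 338 * n ∧ i < 353 * n then time_queue ++ [5]
       else if i ≥ 353 * n ∧ i < 362 * n then time_queue ++ [6]
       else time_queue ++ [7])
      = time_queue ++ [(bisectRight [129*n,200*n,300*n,338*n,353*n,362*n] i : Int) + 1] := by
    intro tq i hi
    have := pointwise n i hi
    split_ifs at this ⊢ <;> simp_all
  have hmem : ∀ (l : List Int), (∀ i ∈ l, (0:Int) ≤ i) → ∀ (acc : List Int),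
      l.foldl (fun time_queue i =>
        if i < 129 * n then time_queue ++ [1]
        else if i ≥ 129 * n ∧ i < 200 * n then time_queue ++ [2]
        else if i ≥ 200 * n ∧ i < 300 * n then time_queue ++ [3]
        else if i ≥ 300 * n ∧ i < 338 * n then time_queue ++ [4]
        else if i ≥ 338 * n ∧ i < 353 * n then time_queue ++ [5]
        else if i ≥ 353 * n ∧ i < 362 * n then time_queue ++ [6]
        else time_queue ++ [7]) acc
      = acc ++ l.map (fun i => (bisectRight [129*n,200*n,300*n,338*n,353*n,362*n] i : Int) + 1) := by
    intro l
    induction l with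
    | nil => simp
    | cons x xs ih =>
      intro hpos acc
      have hx : (0:Int) ≤ x := hpos x (List.mem_cons_self ..)
      simp only [List.foldl_cons, List.map_cons]
      rw [h acc x hx, ih (fun i hi => hpos i (List.mem_cons_of_mem _ hi))]
      simp [List.append_assoc]
  have hall : ∀ i ∈ PySem.List.pyRange 0 5000 1, (0:Int) ≤ i := by
    intro i hi
    have := (PySem.List.mem_pyRange_one).1 hi
    omega
  simpa using hmem (PySem.List.pyRange 0 5000 1) hall []
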